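-- pv_equiv track=rewrite | github.com/thebringerofdeath789/nfsp00f3r-V4.06 | advanced_card_manager.py | _generate_pin_block_format_0
-- ===== SOURCE A (Python) =====
-- def _generate_pin_block_format_0(pin: str, pan: str) -> str:
--     """Generate PIN block format 0"""
--     try:
--         # Pad PIN to 4 digits, add control field
--         pin_padded = pin.ljust(4, 'F')
--         control_field = f"0{len(pin):01X}"
--         pin_block_part = (control_field + pin_padded).ljust(16, 'F')
--
--         # XOR with PAN (rightmost 12 digits, excluding check digit)
--         pan_part = ("0000" + pan[-13:-1]).ljust(16, '0')
--
--         result = ""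
--         for i in range(0, 16, 2):
--             pin_byte = int(pin_block_part[i:i+2], 16)
--             pan_byte = int(pan_part[i:i+2], 16)
--             result += f"{pin_byte ^ pan_byte:02X}"
--
--         return result
--     except:
--         return "0000000000000000"
-- ===== SOURCE B (Python) =====
-- def _generate_pin_block_format_0(pin: str, pan: str) -> str:
--     """Generate PIN block format 0 (recursive two-string descent)."""
--     # first 16 chars of control field + PIN, padded out with 'F'
--     left = (f"0{len(pin):X}" + pin + "F" * 16)[:16]
--     # "0000" + rightmost 12 PAN digits (check digit excluded), padded with '0'
--     right = ("0000" + pan[-13:-1] + "0" * 12)[:16]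
--
--     def go(ls: str, rs: str) -> str:
--         if not ls:
--             return ""
--         return f"{int(ls[:2], 16) ^ int(rs[:2], 16):02X}" + go(ls[2:], rs[2:])
--
--     try:
--         return go(left, right)
--     except ValueError:
--         return "0000000000000000"
-- ===== Notes on version B (the rewrite author's own statement) =====
-- stated objective: alternative
-- what changed: B replaces A's double ljust-padding by a single concatenate-then-truncate construction of the two 16-char blocks and replaces the index loop over range(0,16,2) with string concatenation by a recursive descent that consumes two characters of both blocks per step, assembling the result back-to-front.
import Mathlib
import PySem

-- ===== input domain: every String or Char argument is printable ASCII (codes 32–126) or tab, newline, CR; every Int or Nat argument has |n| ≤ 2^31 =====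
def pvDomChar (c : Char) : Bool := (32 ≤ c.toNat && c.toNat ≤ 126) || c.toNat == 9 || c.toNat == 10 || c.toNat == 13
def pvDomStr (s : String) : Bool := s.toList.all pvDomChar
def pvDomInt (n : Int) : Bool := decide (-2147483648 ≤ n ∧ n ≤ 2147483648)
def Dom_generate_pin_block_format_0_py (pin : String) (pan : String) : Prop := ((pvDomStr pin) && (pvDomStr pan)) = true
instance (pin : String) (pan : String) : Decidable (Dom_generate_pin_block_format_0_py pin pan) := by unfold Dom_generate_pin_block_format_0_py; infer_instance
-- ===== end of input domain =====

-- B replaces A's double-ljust + index loop by single-concatenation padding and a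
-- recursive two-string descent; same return value on every input (alternative, not faster).

-- ===== PORT A =====
-- shared formatting helpers (Python has no named helpers; these port its f-strings exactly)
-- uppercase hex digit for n < 16
def pvHexDigit (n : Nat) : Char := if n < 10 then Char.ofNat (48 + n) else Char.ofNat (55 + n)
-- f"{n:X}" for n : Nat (uppercase hex, no sign, at least one digit) — exact
def pvHexNat (n : Nat) : List Char :=
  if _h : n < 16 then [pvHexDigit n]
  else pvHexNat (n / 16) ++ [pvHexDigit (n % 16)]
  decreasing_by exact Nat.div_lt_self (by omega) (by omega)
-- f"{v:02X}" — exact for any Int (width 2, zero padding after the sign)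
def pvFmt02X (v : Int) : List Char :=
  if v < 0 then
    ('-' :: List.replicate (1 - (pvHexNat (-v).toNat).length) '0') ++ pvHexNat (-v).toNat
  else
    List.replicate (2 - (pvHexNat v.toNat).length) '0' ++ pvHexNat v.toNat
-- s.ljust(w, f) — exact
def pvLjust (cs : List Char) (w : Nat) (f : Char) : List Char :=
  cs ++ List.replicate (w - cs.length) f

-- loop body of A: result acc, index i ↦ acc extended by f"{pin_byte ^ pan_byte:02X}";
-- none = a ValueError was raised (caught by A's bare except)
def pvAByte (L R : List Char) (acc : Option (List Char)) (i : Int) : Option (List Char) :=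
  match acc with
  | none => none
  | some res =>
    match PySem.Int.ofCharsBase? (PySem.List.slice L (some i) (some (i + 2))) 16,
          PySem.Int.ofCharsBase? (PySem.List.slice R (some i) (some (i + 2))) 16 with
    | some pb, some qb => some (res ++ pvFmt02X (PySem.Int.bxor pb qb))
    | _, _ => none

def generate_pin_block_format_0_py (pin : String) (pan : String) : String :=
  let pin_padded := pvLjust pin.toList 4 'F'
  let control_field := '0' :: pvHexNat pin.toList.length        -- f"0{len(pin):01X}"
  let pin_block_part := pvLjust (control_field ++ pin_padded) 16 'F'
  let pan_part := pvLjust (['0','0','0','0'] ++ PySem.List.slice pan.toList (some (-13)) (some (-1))) 16 '0'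
  match (PySem.List.pyRange 0 16 2).foldl (pvAByte pin_block_part pan_part) (some []) with
  | some res => String.ofList res
  | none => "0000000000000000"

-- ===== PORT B =====
-- go(ls, rs) of Source B: consume two hex chars of each string per step; ls[2:] on a
-- non-empty list is exactly ls.tail.drop 1, rs[2:] is rs.drop 2 (nonnegative slice = drop)
def pvGo : List Char → List Char → Option (List Char)
  | [], _ => some []
  | a :: ls, rs =>
    match PySem.Int.ofCharsBase? ((a :: ls).take 2) 16, PySem.Int.ofCharsBase? (rs.take 2) 16 with
    | some x, some y => (pvGo (ls.drop 1) (rs.drop 2)).map (fun t => pvFmt02X (PySem.Int.bxor x y) ++ t)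
    | _, _ => none
  termination_by ls _ => ls.length
  decreasing_by simp

def generate_pin_block_format_0_py_alt (pin : String) (pan : String) : String :=
  -- (f"0{len(pin):X}" + pin + "F"*16)[:16] — nonnegative bound, so [:16] = take 16
  let left := (('0' :: pvHexNat pin.toList.length) ++ pin.toList ++ List.replicate 16 'F').take 16
  -- ("0000" + pan[-13:-1] + "0"*12)[:16]
  let right := ((['0','0','0','0'] ++ PySem.List.slice pan.toList (some (-13)) (some (-1))) ++ List.replicate 12 '0').take 16
  match pvGo left right with
  | some res => String.ofList res
  | none => "0000000000000000"

-- ===== PRECONDITION & SPEC =====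
def Spec_generate_pin_block_format_0_py (pin : String) (pan : String) (out : String) : Prop := out = generate_pin_block_format_0_py_alt pin pan
instance (pin : String) (pan : String) (out : String) : Decidable (Spec_generate_pin_block_format_0_py pin pan out) := by unfold Spec_generate_pin_block_format_0_py; infer_instance

-- ===== CLAIM (what is proved, stated in full; the proofs are below) =====
def Claim_equal_generate_pin_block_format_0_py : Prop := ∀ (pin : String) (pan : String), Dom_generate_pin_block_format_0_py pin pan → Spec_generate_pin_block_format_0_py pin pan (generate_pin_block_format_0_py pin pan)

-- ===== LEMMAS AND PROOFS =====

lemma pvFoldA_none (L R : List Char) (xs : List Int) :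
    xs.foldl (pvAByte L R) none = none := by
  induction xs with
  | nil => rfl
  | cons x xs ih => simpa [pvAByte] using ih

lemma pvRange8 : PySem.List.pyRange 0 16 2
    = (List.range 8).map (fun j => ((2 * (0 + j) : Nat) : Int)) := by decide

-- padding with enough fill then truncating to n is padding with n fill then truncating
lemma pvPadTake (xs : List Char) (f : Char) (n m : Nat) (h : n - xs.length ≤ m) :
    (xs ++ List.replicate m f).take n = xs.take n ++ List.replicate (n - xs.length) f := by
  rw [List.take_append, List.take_replicate, Nat.min_eq_left h]

-- the key loop correspondence: A's fold over indices 2s, 2s+2, …, 2(s+k)-2 equals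
-- B's recursive descent on the corresponding chunks
lemma pvKey (k : Nat) (s : Nat) (L R : List Char) (acc : List Char)
    (hk : 2 * (s + k) ≤ 16) (hL : 16 ≤ L.length) :
    ((List.range k).map (fun j => ((2 * (s + j) : Nat) : Int))).foldl
        (pvAByte L R) (some acc)
      = (pvGo ((L.drop (2 * s)).take (2 * k)) (R.drop (2 * s))).map (fun t => acc ++ t) := by
  induction k generalizing s acc with
  | zero => simp [pvGo]
  | succ k ih =>
    have hidx : ((List.range (k+1)).map (fun j => ((2 * (s + j) : Nat) : Int)))
        = ((2 * s : Nat) : Int) :: ((List.range k).map (fun j => ((2 * ((s+1) + j) : Nat) : Int))) := by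
      rw [List.range_succ_eq_map, List.map_cons, List.map_map]
      refine congrArg₂ (· :: ·) (by norm_num) (List.map_congr_left ?_)
      intro j _
      simp only [Function.comp]
      omega
    rw [hidx, List.foldl_cons]
    set ls := (L.drop (2 * s)).take (2 * (k+1)) with hls
    have hlslen : ls.length = 2 * (k + 1) := by
      rw [hls]; simp only [List.length_take, List.length_drop]; omega
    have hlsne : ls ≠ [] := by
      intro h; rw [h] at hlslen; simp at hlslen
    obtain ⟨a, t, hat⟩ := List.exists_cons_of_ne_nil hlsne
    have hsliceL : PySem.List.slice L (some ((2 * s : Nat) : Int)) (some (((2 * s : Nat) : Int) + 2))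
        = (L.drop (2 * s)).take 2 := by
      have h2 : ((2 * s : Nat) : Int) + 2 = ((2 * s + 2 : Nat) : Int) := by push_cast; ring
      rw [h2, PySem.List.slice_natCast]
      congr 1; omega
    have hsliceR : PySem.List.slice R (some ((2 * s : Nat) : Int)) (some (((2 * s : Nat) : Int) + 2))
        = (R.drop (2 * s)).take 2 := by
      have h2 : ((2 * s : Nat) : Int) + 2 = ((2 * s + 2 : Nat) : Int) := by push_cast; ring
      rw [h2, PySem.List.slice_natCast]
      congr 1; omega
    have htake : ls.take 2 = (L.drop (2 * s)).take 2 := by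
      rw [hls, List.take_take]; congr 1 <;> omega
    have hdropt : t.drop 1 = (L.drop (2 * (s+1))).take (2 * k) := by
      have h1 : t.drop 1 = ls.drop 2 := by rw [hat]; rfl
      rw [h1, hls, List.drop_take, List.drop_drop]
      congr 1 <;> omega
    have hdropR : (R.drop (2 * s)).drop 2 = R.drop (2 * (s+1)) := by
      rw [List.drop_drop]; congr 1 <;> omega
    have hchunk : (a :: t).take 2 = (L.drop (2 * s)).take 2 := by rw [← hat, htake]
    rw [hat, pvGo]
    simp only [pvAByte, hsliceL, hsliceR, hchunk]
    rcases hc1 : PySem.Int.ofCharsBase? ((L.drop (2 * s)).take 2) 16 with _ | x <;>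
      rcases hc2 : PySem.Int.ofCharsBase? ((R.drop (2 * s)).take 2) 16 with _ | y <;>
        simp only []
    · rw [pvFoldA_none]; rfl
    · rw [pvFoldA_none]; rfl
    · rw [pvFoldA_none]; rfl
    · rw [hdropt, hdropR,
        ih (s+1) (acc ++ pvFmt02X (PySem.Int.bxor x y)) (by omega)]
      cases pvGo ((L.drop (2 * (s+1))).take (2 * k)) (R.drop (2 * (s+1))) <;>
        simp [List.append_assoc]

-- ===== VERDICT (by name: the statement is the Claim_ definition above) =====
set_option maxHeartbeats 1000000 in
theorem generate_pin_block_format_0_py_spec : Claim_equal_generate_pin_block_format_0_py := by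
  unfold Claim_equal_generate_pin_block_format_0_py
  intro pin pan _
  unfold Spec_generate_pin_block_format_0_py
  unfold generate_pin_block_format_0_py generate_pin_block_format_0_py_alt
  dsimp only
  set pinL := pin.toList with hpinL
  set panS := PySem.List.slice pan.toList (some (-13)) (some (-1)) with hpanS
  set ctrl := '0' :: pvHexNat pinL.length with hctrl
  set L := pvLjust (ctrl ++ pvLjust pinL 4 'F') 16 'F' with hL
  set R := pvLjust (['0','0','0','0'] ++ panS) 16 '0' with hR
  have hpanSlen : panS.length ≤ 12 := by
    rw [hpanS]
    simp [PySem.List.length_slice]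
    omega
  have hLlen : 16 ≤ L.length := by
    rw [hL]; simp [pvLjust]; omega
  have hE1 : L.take 16 = ((ctrl ++ pinL ++ List.replicate 16 'F').take 16) := by
    have h1 : L = (ctrl ++ pinL) ++ (List.replicate (4 - pinL.length) 'F'
        ++ List.replicate (16 - (ctrl ++ pvLjust pinL 4 'F').length) 'F') := by
      rw [hL]; simp [pvLjust, List.append_assoc]
    rw [h1, ← List.replicate_add,
      pvPadTake _ _ _ _ (by simp [pvLjust]; omega),
      pvPadTake _ _ _ _ (by omega)]
  have hE2 : R = ((['0','0','0','0'] ++ panS ++ List.replicate 12 '0').take 16) := by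
    have hc1 : 16 - (['0','0','0','0'] ++ panS).length ≤ 12 := by
      simp only [List.length_append, List.length_cons, List.length_nil]; omega
    have hc2 : (['0','0','0','0'] ++ panS).length ≤ 16 := by
      simp only [List.length_append, List.length_cons, List.length_nil]; omega
    rw [pvPadTake _ _ _ _ hc1, List.take_of_length_le hc2, hR]
    simp [pvLjust, List.append_assoc]
  rw [pvRange8, pvKey 8 0 L R [] (by omega) hLlen]
  have h0 : (2 : Nat) * 0 = 0 := rfl
  have h16 : (2 : Nat) * 8 = 16 := rfl
  rw [h0, h16, List.drop_zero, List.drop_zero, hE1, hE2]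
  cases pvGo ((ctrl ++ pinL ++ List.replicate 16 'F').take 16)
      ((['0','0','0','0'] ++ panS ++ List.replicate 12 '0').take 16) <;> rfl
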